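-- pv_equiv track=rewrite | github.com/hetruong/CSE190Final | scripts/astar.py | convertToPath
-- ===== SOURCE A (Python) =====
-- def convertToPath(start,Moves):
--     path = [start]
--     currLoc = start;
--     for move in Moves:
--         newLoc = [currLoc[0]+move[0],currLoc[1]+move[1]]
--         currLoc = newLoc
--         path.append(newLoc)
--     return path
-- ===== SOURCE B (Python) =====
-- def convertToPath(start, Moves):
--     if not Moves:
--         return [start]
--     xs = []
--     t = start[0]
--     for m in Moves:
--         t += m[0]
--         xs.append(t)
--     ys = []
--     t = start[1]
--     for m in Moves:
--         t += m[1]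
--         ys.append(t)
--     return [start] + [[x, y] for x, y in zip(xs, ys)]
-- ===== Notes on version B (the rewrite author's own statement) =====
-- stated objective: alternative
-- what changed: Replaces the single lockstep running-position loop with two independent per-axis prefix-sum passes (x and y running totals) recombined via zip into positions.
import Mathlib
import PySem

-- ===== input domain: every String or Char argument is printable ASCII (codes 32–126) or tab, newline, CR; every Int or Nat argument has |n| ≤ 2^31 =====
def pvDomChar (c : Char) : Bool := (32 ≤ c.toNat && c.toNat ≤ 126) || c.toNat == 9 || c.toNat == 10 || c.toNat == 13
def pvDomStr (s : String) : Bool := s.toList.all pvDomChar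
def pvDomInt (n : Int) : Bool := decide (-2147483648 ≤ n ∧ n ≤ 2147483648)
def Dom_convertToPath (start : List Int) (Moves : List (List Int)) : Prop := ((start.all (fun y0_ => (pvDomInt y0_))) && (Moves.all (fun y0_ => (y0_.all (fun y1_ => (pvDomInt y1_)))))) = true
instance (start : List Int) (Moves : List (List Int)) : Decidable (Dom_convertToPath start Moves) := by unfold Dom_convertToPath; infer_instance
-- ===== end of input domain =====

-- B replaces A's single lockstep running-position loop by two independent per-axis
-- prefix-sum passes recombined with zip (alternative decomposition; same cost).

-- ===== PORT A =====
-- literal port of A: one fold carrying (currLoc, path); index reads via pyGet?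
-- (in range whenever Pre_ holds; .getD 0 only totalizes outside Pre_)
def convertToPath (start : List Int) (Moves : List (List Int)) : List (List Int) :=
  (Moves.foldl (fun (st : List Int × List (List Int)) move =>
      let newLoc : List Int :=
        [((PySem.List.pyGet? st.1 0).getD 0) + ((PySem.List.pyGet? move 0).getD 0),
         ((PySem.List.pyGet? st.1 1).getD 0) + ((PySem.List.pyGet? move 1).getD 0)]
      (newLoc, st.2 ++ [newLoc]))
    (start, [start])).2

-- ===== PORT B =====
-- running total over one axis (index i) of Moves, as in Source B's per-axis loops
def pvScanAxis (init : Int) (i : Nat) (Moves : List (List Int)) : List Int :=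
  (Moves.foldl (fun (st : Int × List Int) m =>
      let t := st.1 + ((PySem.List.pyGet? m i).getD 0)
      (t, st.2 ++ [t]))
    (init, [])).2

def convertToPath_alt (start : List Int) (Moves : List (List Int)) : List (List Int) :=
  if Moves = [] then [start]
  else
    start ::
      List.zipWith (fun x y => [x, y])
        (pvScanAxis (((PySem.List.pyGet? start 0).getD 0)) 0 Moves)
        (pvScanAxis (((PySem.List.pyGet? start 1).getD 0)) 1 Moves)

-- ===== PRECONDITION & SPEC =====
-- Pre_ excludes exactly the inputs where Python A raises IndexError:
-- with nonempty Moves, start and every move need at least two components.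
def Pre_convertToPath (start : List Int) (Moves : List (List Int)) : Prop :=
  Moves = [] ∨ (2 ≤ start.length ∧ ∀ m ∈ Moves, 2 ≤ m.length)
instance (start : List Int) (Moves : List (List Int)) : Decidable (Pre_convertToPath start Moves) := by unfold Pre_convertToPath; infer_instance
def pvWitness_convertToPath : List Int × List (List Int) := ([0, 0], [[1, 2], [-1, 0]])

def Spec_convertToPath (start : List Int) (Moves : List (List Int)) (out : List (List Int)) : Prop := out = convertToPath_alt start Moves
instance (start : List Int) (Moves : List (List Int)) (out : List (List Int)) : Decidable (Spec_convertToPath start Moves out) := by unfold Spec_convertToPath; infer_instance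

-- ===== CLAIM (what is proved, stated in full; the proofs are below) =====
def Claim_equal_convertToPath : Prop := ∀ (start : List Int) (Moves : List (List Int)), Dom_convertToPath start Moves → Pre_convertToPath start Moves → Spec_convertToPath start Moves (convertToPath start Moves)

-- ===== LEMMAS AND PROOFS =====

-- recursive form of the per-axis prefix sums
def pvSums (t : Int) (i : Nat) : List (List Int) → List Int
  | [] => []
  | m :: ms =>
      let t' := t + ((PySem.List.pyGet? m i).getD 0)
      t' :: pvSums t' i ms

theorem pvScanAxis_go (i : Nat) (Moves : List (List Int)) :
    ∀ (t : Int) (acc : List Int),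
      (Moves.foldl (fun (st : Int × List Int) m =>
          let t := st.1 + ((PySem.List.pyGet? m i).getD 0)
          (t, st.2 ++ [t])) (t, acc)).2 = acc ++ pvSums t i Moves := by
  induction Moves with
  | nil => intro t acc; simp [pvSums]
  | cons m ms ih =>
      intro t acc
      simp only [List.foldl_cons, pvSums]
      rw [ih]
      simp

theorem pvScanAxis_eq (init : Int) (i : Nat) (Moves : List (List Int)) :
    pvScanAxis init i Moves = pvSums init i Moves := by
  unfold pvScanAxis
  rw [pvScanAxis_go]
  simp

theorem convertToPath_fold (Moves : List (List Int)) :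
    ∀ (x y : Int) (acc : List (List Int)),
      (Moves.foldl (fun (st : List Int × List (List Int)) move =>
          let newLoc : List Int :=
            [((PySem.List.pyGet? st.1 0).getD 0) + ((PySem.List.pyGet? move 0).getD 0),
             ((PySem.List.pyGet? st.1 1).getD 0) + ((PySem.List.pyGet? move 1).getD 0)]
          (newLoc, st.2 ++ [newLoc])) ([x, y], acc)).2
        = acc ++ List.zipWith (fun a b => [a, b]) (pvSums x 0 Moves) (pvSums y 1 Moves) := by
  induction Moves with
  | nil => intro x y acc; simp [pvSums]
  | cons m ms ih =>
      intro x y acc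
      simp only [List.foldl_cons, pvSums]
      rw [ih]
      simp [PySem.List.pyGet?, PySem.List.pyIdx?]

-- ===== VERDICT (by name: the statement is the Claim_ definition above) =====
theorem convertToPath_spec : Claim_equal_convertToPath := by
  intro start Moves _ _
  unfold Spec_convertToPath convertToPath convertToPath_alt
  cases Moves with
  | nil => simp
  | cons m ms =>
      simp only [List.foldl_cons]
      rw [convertToPath_fold]
      rw [pvScanAxis_eq, pvScanAxis_eq]
      simp [pvSums]
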